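-- pv_equiv track=rewrite | github.com/douglasherzog/LavanderiaOS | app/forms.py | _comma_to_dot
-- ===== SOURCE A (Python) =====
-- def _comma_to_dot(value):
--     if value is None:
--         return value
--     try:
--         # Normalize monetary strings like "1.234,56" -> "1234.56"
--         if isinstance(value, str):
--             s = value.strip()
--             # keep only digits, comma and dot
--             s = ''.join(ch for ch in s if ch.isdigit() or ch in ',.')
--             # remove thousand separators: dots that are not decimal when comma exists
--             if ',' in s:
--                 s = s.replace('.', '')
--                 s = s.replace(',', '.')
--             # if multiple dots remain, keep the last as decimal separator
--             if s.count('.') > 1: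
--                 parts = s.split('.')
--                 s = ''.join(parts[:-1]) + '.' + parts[-1]
--             return s
--         return value
--     except Exception:
--         return value
-- ===== SOURCE B (Python) =====
-- def _comma_to_dot(value):
--     if value is None:
--         return value
--     if not isinstance(value, str):
--         return value
--     # keep only digits, comma and dot (same filter as before)
--     s = [ch for ch in value.strip() if ch.isdigit() or ch in ',.']
--     # decimal separator: a comma wins over a dot; dots are thousands marks then
--     sep = ',' if ',' in s else ('.' if '.' in s else None)
--     digits = ''.join(ch for ch in s if ch.isdigit())
--     if sep is None:
--         return digits
--     # splice a single '.' where the last separator sat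
--     idx = len(s) - 1 - s[::-1].index(sep)
--     before = sum(1 for ch in s[:idx] if ch.isdigit())
--     return digits[:before] + '.' + digits[before:]
-- ===== Notes on version B (the rewrite author's own statement) =====
-- stated objective: simpler
-- what changed: Instead of A's three rewrite passes (delete dots, swap commas to dots, then split-and-rejoin to drop surplus dots), B collects the digits once, locates the last separator (comma preferred over dot), and splices a single decimal point at the corresponding digit position.
import Mathlib
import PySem

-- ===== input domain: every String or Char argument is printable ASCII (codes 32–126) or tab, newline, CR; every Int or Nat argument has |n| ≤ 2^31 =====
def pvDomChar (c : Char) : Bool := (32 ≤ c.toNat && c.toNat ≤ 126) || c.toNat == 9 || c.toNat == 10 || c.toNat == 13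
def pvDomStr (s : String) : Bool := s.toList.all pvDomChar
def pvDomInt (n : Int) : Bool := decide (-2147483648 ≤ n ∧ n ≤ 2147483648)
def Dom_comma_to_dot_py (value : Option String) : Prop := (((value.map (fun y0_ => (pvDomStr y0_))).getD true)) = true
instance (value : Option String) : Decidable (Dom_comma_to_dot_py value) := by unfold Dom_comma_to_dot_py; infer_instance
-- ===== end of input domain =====

-- B replaces A's replace/split/re-join fix-up passes by one positional splice: collect the digits,
-- find the last separator (comma wins over dot), and insert one decimal point at that digit position (objective: simpler).

-- ===== PORT A =====
-- Python A: value is typed Option String here, so `isinstance(value, str)` is always true on `some`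
-- and the try-body never raises; those two guards reduce to nothing in the port.
def comma_to_dot_py (value : Option String) : Option String :=
  match value with
  | none => none
  | some v =>
    -- s = value.strip(); keep only digits, comma and dot (''.join of a filtering generator)
    let s := (PySem.Chars.strip v.toList).filter
        (fun ch => PySem.Chars.isdigit ch || ch == ',' || ch == '.')
    -- if ',' in s: s = s.replace('.','').replace(',','.')
    let s := if PySem.Chars.isIn [','] s then
        PySem.Chars.replace (PySem.Chars.replace s ['.'] []) [','] ['.']
      else s
    -- if s.count('.') > 1: s = ''.join(parts[:-1]) + '.' + parts[-1]
    let s := if PySem.Chars.count s ['.'] > 1 then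
        let parts := PySem.Chars.splitOn s ['.']
        -- parts[:-1] is dropLast; parts[-1] is getLastD (split results are never empty)
        PySem.Chars.join [] parts.dropLast ++ '.' :: parts.getLastD []
      else s
    some (String.mk s)

-- ===== PORT B =====
def comma_to_dot_py_alt (value : Option String) : Option String :=
  match value with
  | none => none
  | some v =>
    -- s = [ch for ch in value.strip() if ch.isdigit() or ch in ',.']  (a list of chars)
    let s := (PySem.Chars.strip v.toList).filter
        (fun ch => PySem.Chars.isdigit ch || ch == ',' || ch == '.')
    -- sep = ',' if ',' in s else ('.' if '.' in s else None)  (list membership)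
    let sep : Option Char := if s.contains ',' then some ','
      else if s.contains '.' then some '.' else none
    -- digits = ''.join(ch for ch in s if ch.isdigit())
    let digits := s.filter PySem.Chars.isdigit
    match sep with
    | none => some (String.mk digits)
    | some c =>
      -- idx = len(s) - 1 - s[::-1].index(sep); sep ∈ s, so .index never raises (getD 0 is dead)
      let idx := s.length - 1 - ((PySem.List.index? s.reverse c).getD 0)
      -- before = sum(1 for ch in s[:idx] if ch.isdigit())  (a 0/1 generator sum = countP; exact)
      let before := (s.take idx).countP PySem.Chars.isdigit
      -- digits[:before] + '.' + digits[before:]  (non-negative in-range slices = take/drop; exact)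
      some (String.mk (digits.take before ++ '.' :: digits.drop before))

-- ===== PRECONDITION & SPEC =====
def Spec_comma_to_dot_py (value : Option String) (out : Option String) : Prop := out = comma_to_dot_py_alt value
instance (value : Option String) (out : Option String) : Decidable (Spec_comma_to_dot_py value out) := by unfold Spec_comma_to_dot_py; infer_instance

-- ===== CLAIM (what is proved, stated in full; the proofs are below) =====
def Claim_equal_comma_to_dot_py : Prop := ∀ (value : Option String), Dom_comma_to_dot_py value → Spec_comma_to_dot_py value (comma_to_dot_py value)

-- ===== LEMMAS AND PROOFS =====

-- `c ∈ ',.'` written out; the common filter predicate of both ports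
def pvKeep (ch : Char) : Bool := PySem.Chars.isdigit ch || ch == ',' || ch == '.'

-- Chars.replace with a single-char pattern is a flatMap (fuel-indexed go, fuel ≥ length)
theorem pv_replace_go (o : Char) (new : List Char) :
    ∀ (l : List Char) (fuel : Nat), l.length ≤ fuel → ∀ acc : List Char,
      PySem.Chars.replace.go [o] new fuel l acc
        = acc.reverse ++ l.flatMap (fun c => if c == o then new else [c]) := by
  intro l
  induction l with
  | nil => intro fuel _ acc; cases fuel <;> simp [PySem.Chars.replace.go]
  | cons c t ih =>
    intro fuel hf acc
    cases fuel with
    | zero => simp at hf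
    | succ f =>
      simp only [PySem.Chars.replace.go, List.isPrefixOf]
      by_cases hco : o = c
      · subst hco
        simp only [BEq.rfl, List.isPrefixOf, Bool.and_true, if_pos]
        rw [show ([o].length = 1) from rfl, List.drop_one, List.tail_cons,
          ih f (by simpa using hf) (new.reverse ++ acc)]
        simp
      · have : (o == c) = false := by simp [hco]
        simp only [this, Bool.false_and, if_neg Bool.false_ne_true,
          ih f (by simpa using hf) (c :: acc)]
        simp [if_neg (fun h : c = o => hco h.symm)]

theorem pv_replace_single (l : List Char) (o : Char) (new : List Char) :
    PySem.Chars.replace l [o] new = l.flatMap (fun c => if c == o then new else [c]) := by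
  simp [PySem.Chars.replace, pv_replace_go o new l l.length le_rfl []]

-- Chars.count with a single-char pattern is List.count
theorem pv_count_go (o : Char) :
    ∀ (l : List Char) (fuel : Nat), l.length ≤ fuel → ∀ acc : Nat,
      PySem.Chars.count.go [o] fuel l acc = acc + l.count o := by
  intro l
  induction l with
  | nil => intro fuel _ acc; cases fuel <;> simp [PySem.Chars.count.go]
  | cons c t ih =>
    intro fuel hf acc
    cases fuel with
    | zero => simp at hf
    | succ f =>
      simp only [PySem.Chars.count.go, List.isPrefixOf]
      by_cases hco : o = c
      · subst hco
        simp only [BEq.rfl, List.isPrefixOf, Bool.and_true, if_pos]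
        rw [show ([o].length = 1) from rfl, List.drop_one, List.tail_cons,
          ih f (by simpa using hf) (acc + 1)]
        simp [List.count_cons, BEq.rfl]
        omega
      · have h1 : (o == c) = false := by simp [hco]
        have h2 : (c == o) = false := by simp [Ne.symm hco]
        simp only [h1, Bool.false_and, if_neg Bool.false_ne_true, ih f (by simpa using hf) acc]
        simp [List.count_cons, h2]

theorem pv_count_single (l : List Char) (o : Char) :
    PySem.Chars.count l [o] = l.count o := by
  simp [PySem.Chars.count, pv_count_go o l l.length le_rfl 0]

-- the pure single-char split
def pvSplit (o : Char) : List Char → List (List Char)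
  | [] => [[]]
  | c :: t => if c = o then [] :: pvSplit o t else (pvSplit o t).modifyHead (c :: ·)

theorem pvSplit_ne_nil (o : Char) (l : List Char) : pvSplit o l ≠ [] := by
  cases l with
  | nil => simp [pvSplit]
  | cons c t =>
    simp only [pvSplit]
    split
    · simp
    · cases h : pvSplit o t with
      | nil => exact absurd h (pvSplit_ne_nil o t)
      | cons a b => simp

theorem pv_splitOn_go (o : Char) :
    ∀ (l : List Char) (fuel : Nat), l.length ≤ fuel → ∀ (cur : List Char) (acc : List (List Char)),
      PySem.Chars.splitOn.go [o] fuel l cur acc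
        = acc.reverse ++ (pvSplit o l).modifyHead (cur.reverse ++ ·) := by
  intro l
  induction l with
  | nil => intro fuel _ cur acc; cases fuel <;> simp [PySem.Chars.splitOn.go, pvSplit]
  | cons c t ih =>
    intro fuel hf cur acc
    cases fuel with
    | zero => simp at hf
    | succ f =>
      simp only [PySem.Chars.splitOn.go, List.isPrefixOf]
      by_cases hco : o = c
      · subst hco
        simp only [BEq.rfl, List.isPrefixOf, Bool.and_true, if_pos]
        rw [show ([o].length = 1) from rfl, List.drop_one, List.tail_cons,
          ih f (by simpa using hf) [] (cur.reverse :: acc)]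
        simp [pvSplit]
        cases h : pvSplit o t with
        | nil => exact absurd h (pvSplit_ne_nil o t)
        | cons a b => simp
      · have h1 : (o == c) = false := by simp [hco]
        simp only [h1, Bool.false_and, if_neg Bool.false_ne_true,
          ih f (by simpa using hf) (c :: cur) acc]
        simp only [pvSplit, if_neg (Ne.symm hco)]
        cases h : pvSplit o t with
        | nil => exact absurd h (pvSplit_ne_nil o t)
        | cons a b => simp

theorem pv_splitOn_single (l : List Char) (o : Char) :
    PySem.Chars.splitOn l [o] = pvSplit o l := by
  rw [PySem.Chars.splitOn, pv_splitOn_go o l (l.length + 1) (by omega) [] []]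
  cases h : pvSplit o l with
  | nil => exact absurd h (pvSplit_ne_nil o l)
  | cons a b => simp

theorem pvSplit_no_sep (o : Char) (q : List Char) (hq : o ∉ q) : pvSplit o q = [q] := by
  induction q with
  | nil => rfl
  | cons a b ihq =>
    have ha : a ≠ o := fun h => hq (h ▸ List.mem_cons_self)
    simp [pvSplit, if_neg ha, ihq (fun h => hq (List.mem_cons_of_mem _ h))]

theorem pvSplit_append_last (o : Char) (q : List Char) (hq : o ∉ q) :
    ∀ p : List Char, pvSplit o (p ++ o :: q) = pvSplit o p ++ [q] := by
  intro p
  induction p with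
  | nil =>
    simp [List.nil_append, pvSplit, if_pos rfl, pvSplit_no_sep o q hq]
  | cons c p' ih =>
    simp only [List.cons_append, pvSplit, ih]
    split
    · simp
    · cases h : pvSplit o p' with
      | nil => exact absurd h (pvSplit_ne_nil o p')
      | cons a b => simp

theorem pvSplit_flatten (o : Char) (p : List Char) :
    (pvSplit o p).flatten = p.filter (fun c => !(c == o)) := by
  induction p with
  | nil => simp [pvSplit]
  | cons c p' ih =>
    simp only [pvSplit]
    by_cases h : c = o
    · simp [h, ih]
    · cases hs : pvSplit o p' with
      | nil => exact absurd hs (pvSplit_ne_nil o p')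
      | cons a b =>
        rw [hs] at ih
        simp [h, ← ih, hs]

theorem pv_join_nil_flatten (parts : List (List Char)) :
    PySem.Chars.join [] parts = parts.flatten := by
  induction parts with
  | nil => simp [PySem.Chars.join, List.intercalate]
  | cons a b ih =>
    cases b with
    | nil => simp [PySem.Chars.join, List.intercalate]
    | cons x y =>
      simp only [PySem.Chars.join, List.intercalate] at *
      simp_all [List.intersperse]

theorem pv_isIn_singleton (c : Char) (l : List Char) :
    PySem.Chars.isIn [c] l = true ↔ c ∈ l := by
  rw [PySem.Chars.isIn_iff_infix]
  constructor
  · intro h; exact h.subset (List.mem_singleton_self c)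
  · intro h
    obtain ⟨s, t, rfl⟩ := List.append_of_mem h
    exact ⟨s, t, by simp⟩

theorem pv_last_split {c : Char} {l : List Char} (h : c ∈ l) :
    ∃ u w, l = u ++ c :: w ∧ c ∉ w := by
  induction l with
  | nil => simp at h
  | cons a t ih =>
    by_cases hct : c ∈ t
    · obtain ⟨u, w, rfl, hw⟩ := ih hct
      exact ⟨a :: u, w, rfl, hw⟩
    · have : c = a := by
        rcases List.mem_cons.mp h with h' | h'
        · exact h'
        · exact absurd h' hct
      exact ⟨[], t, by simp [this], hct⟩

-- chars that pass the keep-filter and are not the separator in question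
theorem pv_filter_dot_digit (x : List Char)
    (hx : ∀ ch ∈ x, PySem.Chars.isdigit ch = true ∨ ch = '.') :
    x.filter (fun c => !(c == '.')) = x.filter PySem.Chars.isdigit := by
  induction x with
  | nil => rfl
  | cons a t ih =>
    have ha := hx a List.mem_cons_self
    have ht := fun ch h => hx ch (List.mem_cons_of_mem _ h)
    rcases ha with ha | ha
    · have : (a == '.') = false := by
        by_contra h
        simp only [Bool.not_eq_false, beq_iff_eq] at h
        subst h; revert ha; decide
      simp [List.filter_cons, this, ha, ih ht]
    · subst ha; simp [List.filter_cons, PySem.Chars.isdigit, ih ht]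

-- the A-side transform: delete dots then swap commas to dots, on keep-filtered chars
theorem pv_sigma_del (u : List Char) (hu : ∀ ch ∈ u, pvKeep ch = true) :
    ((u.filter (fun c => !(c == '.'))).flatMap
        (fun c => if c == ',' then ['.'] else [c])).filter (fun c => !(c == '.'))
      = u.filter PySem.Chars.isdigit := by
  induction u with
  | nil => rfl
  | cons a t ih =>
    have ha := hu a List.mem_cons_self
    have ht := ih (fun ch h => hu ch (List.mem_cons_of_mem _ h))
    simp only [pvKeep, Bool.or_eq_true, beq_iff_eq] at ha
    simp only [beq_iff_eq] at ht
    rcases ha with (hd | hc) | hdot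
    · have h1 : (a == '.') = false := by
        by_contra h; simp only [Bool.not_eq_false, beq_iff_eq] at h
        subst h; revert hd; decide
      have h2 : a ≠ ',' := by
        intro h; rw [h] at hd; revert hd; decide
      simp [List.filter_cons, h1, h2, hd, ht]
    · subst hc
      simp [List.filter_cons, ht, show PySem.Chars.isdigit ',' = false from rfl,
        show ((',' : Char) == '.') = false from rfl, show (('.' : Char) == '.') = true from rfl]
    · subst hdot
      simp [List.filter_cons, ht, show PySem.Chars.isdigit '.' = false from rfl,
        show (('.' : Char) == '.') = true from rfl]

-- no-dot lists are unchanged by the transform's swap-filter composition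
theorem pv_no_dot_fixed (x : List Char) (hx : x.count '.' = 0) :
    x.filter (fun c => !(c == '.')) = x :=
  List.filter_eq_self.mpr (fun c hc => by
    have := List.count_eq_zero.mp hx
    simp only [Bool.not_eq_eq_eq_not, Bool.not_true, beq_eq_false_iff_ne, ne_eq]
    intro h; exact this (h ▸ hc))

-- deleting a char by flatMap-to-[] is a filter
theorem pv_flatMap_del (o : Char) (l : List Char) :
    l.flatMap (fun c => if c == o then [] else [c]) = l.filter (fun c => !(c == o)) := by
  induction l with
  | nil => rfl
  | cons a t ih =>
    simp only [List.flatMap_cons, ih, List.filter_cons]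
    by_cases h : a = o <;> simp [h]

-- the comma-to-dot swap does nothing to comma-free lists
theorem pv_flatMap_swap_id (x : List Char) (hx : ∀ c ∈ x, c ≠ ',') :
    x.flatMap (fun c => if c == ',' then ['.'] else [c]) = x := by
  induction x with
  | nil => rfl
  | cons a t ih =>
    have ha := hx a List.mem_cons_self
    simp only [List.flatMap_cons, ih (fun c h => hx c (List.mem_cons_of_mem _ h))]
    simp [ha]

theorem pv_dot_not_mem_digits (x : List Char) : '.' ∉ x.filter PySem.Chars.isdigit := by
  intro h
  have := List.of_mem_filter h
  revert this; decide

theorem pv_count_dot_digits (x : List Char) : (x.filter PySem.Chars.isdigit).count '.' = 0 :=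
  List.count_eq_zero.mpr (pv_dot_not_mem_digits x)

-- B's splice on the last-separator decomposition l = u ++ c :: w, c ∉ w
theorem pv_B_val (c : Char) (hcd : PySem.Chars.isdigit c = false) (u w : List Char)
    (hW : c ∉ w) :
    ((u ++ c :: w).filter PySem.Chars.isdigit).take
        (((u ++ c :: w).take ((u ++ c :: w).length - 1 -
            ((PySem.List.index? (u ++ c :: w).reverse c).getD 0))).countP PySem.Chars.isdigit)
      ++ '.' :: ((u ++ c :: w).filter PySem.Chars.isdigit).drop
        (((u ++ c :: w).take ((u ++ c :: w).length - 1 -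
            ((PySem.List.index? (u ++ c :: w).reverse c).getD 0))).countP PySem.Chars.isdigit)
    = u.filter PySem.Chars.isdigit ++ '.' :: w.filter PySem.Chars.isdigit := by
  have hrev : (u ++ c :: w).reverse = (w.reverse ++ [c]) ++ u.reverse := by
    simp [List.reverse_append]
  have hidx : PySem.List.index? ((u ++ c :: w).reverse) c = some w.length := by
    rw [hrev, PySem.List.index?_append_of_mem _ (by simp),
      PySem.List.index?_append_singleton_self _ c (by simpa using hW)]
    simp
  have hlen : (u ++ c :: w).length - 1 - w.length = u.length := by
    simp [List.length_append]
  have htake : (u ++ c :: w).take u.length = u := List.take_left ..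
  have hdig : (u ++ c :: w).filter PySem.Chars.isdigit
      = u.filter PySem.Chars.isdigit ++ w.filter PySem.Chars.isdigit := by
    simp [List.filter_append, List.filter_cons, hcd]
  have hcount : u.countP PySem.Chars.isdigit = (u.filter PySem.Chars.isdigit).length :=
    List.countP_eq_length_filter ..
  simp only [hidx, Option.getD_some, hlen, htake, hdig, hcount]
  rw [List.take_left' rfl, List.drop_left' rfl]

-- A's transform-and-fixup on the comma decomposition
theorem pv_A_comma (u w : List Char) (hW : ',' ∉ w)
    (hF : ∀ ch ∈ u ++ ',' :: w, pvKeep ch = true) :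
    (if PySem.Chars.count
          (PySem.Chars.replace (PySem.Chars.replace (u ++ ',' :: w) ['.'] []) [','] ['.']) ['.'] > 1 then
       PySem.Chars.join []
           (PySem.Chars.splitOn
             (PySem.Chars.replace (PySem.Chars.replace (u ++ ',' :: w) ['.'] []) [','] ['.']) ['.']).dropLast ++
         '.' :: (PySem.Chars.splitOn
             (PySem.Chars.replace (PySem.Chars.replace (u ++ ',' :: w) ['.'] []) [','] ['.']) ['.']).getLastD []
     else PySem.Chars.replace (PySem.Chars.replace (u ++ ',' :: w) ['.'] []) [','] ['.'])
    = u.filter PySem.Chars.isdigit ++ '.' :: w.filter PySem.Chars.isdigit := by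
  have hFu : ∀ ch ∈ u, pvKeep ch = true := fun ch h => hF ch (by simp [h])
  have hFw : ∀ ch ∈ w, pvKeep ch = true := fun ch h => hF ch (by simp [h])
  -- the transformed string
  have hs : PySem.Chars.replace (PySem.Chars.replace (u ++ ',' :: w) ['.'] []) [','] ['.']
      = ((u.filter (fun c => !(c == '.'))).flatMap (fun c => if c == ',' then ['.'] else [c]))
        ++ '.' :: w.filter PySem.Chars.isdigit := by
    rw [pv_replace_single (u ++ ',' :: w) '.' [], pv_flatMap_del, pv_replace_single]
    have hdelw : w.filter (fun c => !(c == '.')) = w.filter PySem.Chars.isdigit :=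
      pv_filter_dot_digit w (fun ch h => by
        have := hFw ch h
        simp only [pvKeep, Bool.or_eq_true, beq_iff_eq] at this
        rcases this with (h1 | h2) | h3
        · exact Or.inl h1
        · exact absurd (h2 ▸ h) hW
        · exact Or.inr h3)
    have hwsw : (w.filter PySem.Chars.isdigit).flatMap
        (fun c => if c == ',' then ['.'] else [c]) = w.filter PySem.Chars.isdigit :=
      pv_flatMap_swap_id _ (fun ch h hch => hW (hch ▸ List.mem_of_mem_filter h))
    simp only [beq_iff_eq] at hwsw
    simp [List.filter_append, List.filter_cons, List.flatMap_append, hdelw, hwsw]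
  rw [hs]
  set p := (u.filter (fun c => !(c == '.'))).flatMap (fun c => if c == ',' then ['.'] else [c])
    with hp
  have hpfix : p.filter (fun c => !(c == '.')) = u.filter PySem.Chars.isdigit :=
    pv_sigma_del u hFu
  have hcnt : PySem.Chars.count (p ++ '.' :: w.filter PySem.Chars.isdigit) ['.']
      = p.count '.' + 1 := by
    rw [pv_count_single]
    simp [List.count_append, List.count_cons, pv_count_dot_digits]
  by_cases hpz : p.count '.' = 0
  · have : ¬ PySem.Chars.count (p ++ '.' :: w.filter PySem.Chars.isdigit) ['.'] > 1 := by
      rw [hcnt, hpz]; omega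
    rw [if_neg this]
    rw [show p = u.filter PySem.Chars.isdigit from (pv_no_dot_fixed p hpz) ▸ hpfix]
  · have : PySem.Chars.count (p ++ '.' :: w.filter PySem.Chars.isdigit) ['.'] > 1 := by
      rw [hcnt]; omega
    rw [if_pos this, pv_splitOn_single,
      pvSplit_append_last '.' _ (pv_dot_not_mem_digits w) p,
      List.dropLast_concat, pv_join_nil_flatten, pvSplit_flatten, hpfix]
    simp

-- A's fixup in the dot-separator case (no commas anywhere)
theorem pv_A_dot (u w : List Char) (hW : '.' ∉ w) (hC : ',' ∉ u ++ '.' :: w)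
    (hF : ∀ ch ∈ u ++ '.' :: w, pvKeep ch = true) :
    (if PySem.Chars.count (u ++ '.' :: w) ['.'] > 1 then
       PySem.Chars.join [] (PySem.Chars.splitOn (u ++ '.' :: w) ['.']).dropLast ++
         '.' :: (PySem.Chars.splitOn (u ++ '.' :: w) ['.']).getLastD []
     else u ++ '.' :: w)
    = u.filter PySem.Chars.isdigit ++ '.' :: w.filter PySem.Chars.isdigit := by
  have hwd : ∀ ch ∈ w, PySem.Chars.isdigit ch = true := by
    intro ch h
    have := hF ch (by simp [h])
    simp only [pvKeep, Bool.or_eq_true, beq_iff_eq] at this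
    rcases this with (h1 | h2) | h3
    · exact h1
    · exact absurd (h2 ▸ h) (fun hm => hC (by simp [hm]))
    · exact absurd (h3 ▸ h) hW
  have hwfix : w.filter PySem.Chars.isdigit = w := List.filter_eq_self.mpr hwd
  have hufix : u.filter (fun c => !(c == '.')) = u.filter PySem.Chars.isdigit :=
    pv_filter_dot_digit u (fun ch h => by
      have := hF ch (by simp [h])
      simp only [pvKeep, Bool.or_eq_true, beq_iff_eq] at this
      rcases this with (h1 | h2) | h3
      · exact Or.inl h1
      · exact absurd (h2 ▸ h) (fun hm => hC (by simp [hm]))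
      · exact Or.inr h3)
  have hcnt : PySem.Chars.count (u ++ '.' :: w) ['.'] = u.count '.' + 1 := by
    rw [pv_count_single]
    simp [List.count_append, List.count_cons, List.count_eq_zero.mpr hW]
  by_cases huz : u.count '.' = 0
  · have : ¬ PySem.Chars.count (u ++ '.' :: w) ['.'] > 1 := by rw [hcnt, huz]; omega
    rw [if_neg this]
    have hu : u.filter PySem.Chars.isdigit = u := by
      rw [← hufix]; exact pv_no_dot_fixed u huz
    rw [hwfix, hu]
  · have : PySem.Chars.count (u ++ '.' :: w) ['.'] > 1 := by rw [hcnt]; omega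
    rw [if_pos this, pv_splitOn_single, pvSplit_append_last '.' w hW u,
      List.dropLast_concat, pv_join_nil_flatten, pvSplit_flatten, hufix, hwfix]
    simp

-- ===== VERDICT (by name: the statement is the Claim_ definition above) =====
theorem comma_to_dot_py_spec : Claim_equal_comma_to_dot_py := by
  intro value _
  unfold Spec_comma_to_dot_py
  cases value with
  | none => rfl
  | some v =>
    simp only [comma_to_dot_py, comma_to_dot_py_alt]
    set l := (PySem.Chars.strip v.toList).filter
        (fun ch => PySem.Chars.isdigit ch || ch == ',' || ch == '.') with hl
    have hF : ∀ ch ∈ l, pvKeep ch = true := by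
      intro ch hch
      simpa [pvKeep] using List.of_mem_filter hch
    by_cases hc : ',' ∈ l
    · have h1 : PySem.Chars.isIn [','] l = true := (pv_isIn_singleton ',' l).mpr hc
      have h2 : l.contains ',' = true := by simpa using hc
      simp only [h1, h2, if_true]
      obtain ⟨u, w, hlu, hW⟩ := pv_last_split hc
      rw [hlu] at hF ⊢
      rw [pv_A_comma u w hW hF, pv_B_val ',' rfl u w hW]
    · have h1 : PySem.Chars.isIn [','] l = false := by
        by_contra h
        exact hc ((pv_isIn_singleton ',' l).mp (by simpa using h))
      have h2 : l.contains ',' = false := by simpa using hc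
      simp only [h1, h2, if_false, Bool.false_eq_true]
      by_cases hd : '.' ∈ l
      · have h3 : l.contains '.' = true := by simpa using hd
        simp only [h3, if_true]
        obtain ⟨u, w, hlu, hW⟩ := pv_last_split hd
        have hC : ',' ∉ u ++ '.' :: w := hlu ▸ hc
        rw [hlu] at hF ⊢
        rw [pv_A_dot u w hW hC hF, pv_B_val '.' rfl u w hW]
      · have h3 : l.contains '.' = false := by simpa using hd
        simp only [h3, if_false, Bool.false_eq_true]
        have hall : ∀ ch ∈ l, PySem.Chars.isdigit ch = true := by
          intro ch hch
          have := hF ch hch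
          simp only [pvKeep, Bool.or_eq_true, beq_iff_eq] at this
          rcases this with (hx | hx) | hx
          · exact hx
          · exact absurd (hx ▸ hch) hc
          · exact absurd (hx ▸ hch) hd
        have hcnt : ¬ PySem.Chars.count l ['.'] > 1 := by
          rw [pv_count_single, List.count_eq_zero.mpr hd]; omega
        rw [if_neg hcnt, List.filter_eq_self.mpr hall]
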